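-- pv_equiv track=rewrite | github.com/bendrucker11/Tic-Tac-Toe | Game.py | user_col_contains_2
-- ===== SOURCE A (Python) =====
-- def user_col_contains_2(lst):
--     for i in range(3):
--         x_count = 0
--         non_o_count = 0
--         for j in range(3):
--             if lst[j][i] == "x":
--                 x_count += 1
--             elif lst[j][i] != "o":
--                 non_o_count += 1
--         if x_count == 2 and non_o_count == 1:
--             return i, True
--     return -1, False
-- ===== SOURCE B (Python) =====
-- def user_col_contains_2(lst):
--     # One row-major pass builds per-column x/o counters, then a scan picks the
--     # first column with two x's and no o (forcing exactly one empty cell).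
--     xs = [0, 0, 0]
--     os_ = [0, 0, 0]
--     for j in range(3):
--         row = lst[j]
--         for i in range(3):
--             c = row[i]
--             if c == "x":
--                 xs[i] += 1
--             elif c == "o":
--                 os_[i] += 1
--     for i in range(3):
--         if xs[i] == 2 and os_[i] == 0:
--             return i, True
--     return -1, False
-- ===== Notes on version B (the rewrite author's own statement) =====
-- stated objective: alternative
-- what changed: A scans column-by-column keeping x/non-o counters with an early return inside the column loop; B makes one row-major pass over the board building per-column x and o counters, then scans the three counter pairs for the first column with two x's and no o.
-- outside the precondition, e.g. on user_col_contains_2([['x'], ['x'], ['q']]): A returns (0, True), B raises IndexError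
import Mathlib
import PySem

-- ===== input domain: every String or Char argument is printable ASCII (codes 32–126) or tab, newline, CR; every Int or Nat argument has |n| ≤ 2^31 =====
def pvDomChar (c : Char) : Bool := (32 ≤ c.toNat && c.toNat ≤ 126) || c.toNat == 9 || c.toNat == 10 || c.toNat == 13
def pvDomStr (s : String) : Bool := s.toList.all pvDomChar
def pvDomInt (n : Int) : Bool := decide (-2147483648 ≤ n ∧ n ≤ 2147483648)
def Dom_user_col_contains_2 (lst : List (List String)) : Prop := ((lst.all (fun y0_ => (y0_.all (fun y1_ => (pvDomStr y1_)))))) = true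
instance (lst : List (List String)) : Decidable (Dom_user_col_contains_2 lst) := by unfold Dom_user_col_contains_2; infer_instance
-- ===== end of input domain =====

-- B makes one row-major pass building per-column x/o counters, then scans them;
-- A scans column-by-column with x/non-o counters and an early return. Equivalence
-- proved on full 3×3 boards (Pre_); return value only, no mutation is observable.

-- ===== PORT A =====
-- lst[j][i] (IndexError → none, excluded by Pre_)
def pvCell? (lst : List (List String)) (j i : Int) : Option String :=
  match PySem.List.pyGet? lst j with
  | none => none
  | some row => PySem.List.pyGet? row i

-- inner 'for j in range(3)' loop of A: accumulates (x_count, non_o_count)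
def pvAColumn (lst : List (List String)) (i : Int) : Option (Int × Int) :=
  (PySem.List.pyRange 0 3 1).foldl
    (fun acc j =>
      match acc with
      | none => none
      | some (xc, nc) =>
        match pvCell? lst j i with
        | none => none
        | some c =>
          if c = "x" then some (xc + 1, nc)
          else if c ≠ "o" then some (xc, nc + 1)
          else some (xc, nc))
    (some (0, 0))

-- outer 'for i in range(3)' loop of A with its early return
def pvALoop (lst : List (List String)) : List Int → Int × Bool
  | [] => (-1, false)
  | i :: rest =>
    match pvAColumn lst i with
    | none => (-1, false)   -- IndexError path, unreachable under Pre_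
    | some (xc, nc) => if xc = 2 ∧ nc = 1 then (i, true) else pvALoop lst rest

def user_col_contains_2 (lst : List (List String)) : Int × Bool :=
  pvALoop lst (PySem.List.pyRange 0 3 1)

-- ===== PORT B =====
-- the row-major counting pass of B; indices written to xs/os_ are 0,1,2, so .toNat is exact
def pvBCount (lst : List (List String)) : Option (List Int × List Int) :=
  (PySem.List.pyRange 0 3 1).foldl
    (fun acc j =>
      match acc with
      | none => none
      | some st =>
        match PySem.List.pyGet? lst j with
        | none => none   -- IndexError, unreachable under Pre_
        | some row =>
          (PySem.List.pyRange 0 3 1).foldl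
            (fun acc2 i =>
              match acc2 with
              | none => none
              | some (xs, os_) =>
                match PySem.List.pyGet? row i with
                | none => none   -- IndexError, unreachable under Pre_
                | some c =>
                  if c = "x" then some (xs.set i.toNat (xs.getD i.toNat 0 + 1), os_)
                  else if c = "o" then some (xs, os_.set i.toNat (os_.getD i.toNat 0 + 1))
                  else some (xs, os_))
            (some st))
    (some ([0, 0, 0], [0, 0, 0]))

-- the final 'for i in range(3)' scan of B; xs/os_ always have length 3, so getD is exact
def pvBScan (xs os_ : List Int) : List Int → Int × Bool
  | [] => (-1, false)
  | i :: rest =>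
    if xs.getD i.toNat 0 = 2 ∧ os_.getD i.toNat 0 = 0 then (i, true)
    else pvBScan xs os_ rest

def user_col_contains_2_alt (lst : List (List String)) : Int × Bool :=
  match pvBCount lst with
  | none => (-1, false)   -- IndexError path, unreachable under Pre_
  | some (xs, os_) => pvBScan xs os_ (PySem.List.pyRange 0 3 1)

-- ===== PRECONDITION & SPEC =====
-- Pre_ requires a full 3×3 board (at least 3 rows, each of the first 3 rows with at
-- least 3 cells): on ragged boards A raises IndexError, except when an early complete
-- column already matches (then A returns but B, which reads the whole board first,
-- raises IndexError there) — see the cite in the claim.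
def Pre_user_col_contains_2 (lst : List (List String)) : Prop :=
  3 ≤ lst.length ∧ ∀ row ∈ lst.take 3, 3 ≤ row.length
instance (lst : List (List String)) : Decidable (Pre_user_col_contains_2 lst) := by
  unfold Pre_user_col_contains_2; infer_instance

def pvWitness_user_col_contains_2 : List (List String) :=
  [["x", "o", "e"], ["x", "e", "e"], ["e", "e", "o"]]

def Spec_user_col_contains_2 (lst : List (List String)) (out : Int × Bool) : Prop := out = user_col_contains_2_alt lst
instance (lst : List (List String)) (out : Int × Bool) : Decidable (Spec_user_col_contains_2 lst out) := by unfold Spec_user_col_contains_2; infer_instance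

-- ===== CLAIM (what is proved, stated in full; the proofs are below) =====
def Claim_equal_user_col_contains_2 : Prop := ∀ (lst : List (List String)), Dom_user_col_contains_2 lst → Pre_user_col_contains_2 lst → Spec_user_col_contains_2 lst (user_col_contains_2 lst)

-- ===== LEMMAS AND PROOFS =====

-- classification of a cell: all either port does with a cell depends only on this tag
def pvTag (s : String) : Fin 3 := if s = "x" then 0 else if s = "o" then 1 else 2

theorem pvTagIte {α : Sort _} (s : String) (u v w : α) :
    (if s = "x" then u else if s = "o" then v else w) =
    (if pvTag s = 0 then u else if pvTag s = 1 then v else w) := by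
  by_cases h1 : s = "x"
  · simp [pvTag, h1]
  by_cases h2 : s = "o"
  · simp [pvTag, h2]
  · simp [pvTag, h1, h2]

set_option maxHeartbeats 2000000 in
theorem pvMain (r0 r1 r2 : List String) (t : List (List String))
    (h0 : 3 ≤ r0.length) (h1 : 3 ≤ r1.length) (h2 : 3 ≤ r2.length) :
    user_col_contains_2 (r0 :: r1 :: r2 :: t) = user_col_contains_2_alt (r0 :: r1 :: r2 :: t) := by
  rcases r0 with _|⟨a0,_|⟨b0,_|⟨c0,t0⟩⟩⟩ <;> simp at h0
  rcases r1 with _|⟨a1,_|⟨b1,_|⟨c1,t1⟩⟩⟩ <;> simp at h1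
  rcases r2 with _|⟨a2,_|⟨b2,_|⟨c2,t2⟩⟩⟩ <;> simp at h2
  have hR : PySem.List.pyRange 0 3 1 = [0, 1, 2] := by decide
  simp only [user_col_contains_2, user_col_contains_2_alt, pvALoop, pvAColumn, pvBCount,
    pvBScan, pvCell?, hR, List.foldl]
  simp only [PySem.List.pyGet?, PySem.List.pyIdx?]
  norm_num
  have hnn : (0 : Int) ≤ (t.length : Int) + 1 + 1 := by positivity
  have hnn2 : (0 : Int) ≤ (t.length : Int) + 1 := by positivity
  have hnn3 : (2 : Int) ≤ (t.length : Int) + 1 + 1 := by omega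
  simp only [if_pos hnn, if_pos hnn2, if_pos hnn3, Option.bind_some]
  norm_num [List.getElem?_cons]
  have ht2 : Int.toNat 2 = 2 := rfl
  norm_num [ht2, List.getElem?_cons]
  simp only [pvTagIte]
  generalize pvTag a0 = g0
  generalize pvTag b0 = g1
  generalize pvTag c0 = g2
  generalize pvTag a1 = g3
  generalize pvTag b1 = g4
  generalize pvTag c1 = g5
  generalize pvTag a2 = g6
  generalize pvTag b2 = g7
  generalize pvTag c2 = g8
  revert g0 g1 g2 g3 g4 g5 g6 g7 g8
  decide

-- ===== VERDICT (by name: the statement is the Claim_ definition above) =====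
theorem user_col_contains_2_spec : Claim_equal_user_col_contains_2 := by
  intro lst _ hpre
  unfold Spec_user_col_contains_2
  obtain ⟨hlen, hrow⟩ := hpre
  rcases lst with _|⟨r0, _|⟨r1, _|⟨r2, t⟩⟩⟩ <;> simp at hlen
  exact pvMain r0 r1 r2 t (hrow r0 (by simp)) (hrow r1 (by simp)) (hrow r2 (by simp))
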